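-- pv_equiv track=rewrite | github.com/AtuelFullana/algoritmos-1 | unruly.py | secuencia_es_valida
-- ===== SOURCE A (Python) =====
-- from typing import List, Tuple, Any
--
-- Grilla = Any
--
-- VACIO = " "
--
-- NEGRO = "1"
--
-- BLANCO = "0"
--
-- def posicion_es_vacia(grilla: Grilla, col: int, fil: int) -> bool:
--     """Devuelve un booleano indicando si la posición de la grilla dada por las
--     coordenadas `col` y `fil` está vacía"""
--     return (grilla[fil][col] == VACIO)
--
-- def misma_cant_cero_uno(fila: List[str]) -> bool:
--     """Devuelve un booleano indicando si la grilla tiene la misma cantidad de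
--     cero y unos."""
--     ceros = 0
--     unos = 0
--     for col in range(len(fila)):
--         if fila[col] == BLANCO:
--             ceros += 1
--         if fila[col] == NEGRO:
--             unos += 1
--     return ceros == unos
--
-- def tres_casilleros_consecutivos(fila: List[str]) -> bool:
--     """Devuelve un booleano indicando si hay tres casilleros consecutivos iguales."""
--     ceros = 0
--     unos = 0
--     pasos = 0
--     for elemento in fila:
--         pasos += 1
--         if elemento == BLANCO:
--             unos = 0
--             ceros += 1
--         elif elemento == NEGRO:
--             ceros = 0
--             unos += 1
--         if ceros == 3 or  unos == 3:
--             return True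
--         if len(fila) < pasos:
--             return False
--
-- def secuencia_es_valida(secuencia, fila: int):
--     """Devuelve un booleano indicando si la fila de la secuencia denotada por el
--     índice `fil` es considerada válida.
--
--     Una fila válida cuando se cumplen todas estas condiciones:
--         - La fila no tiene vacíos
--         - La fila tiene la misma cantidad de unos y ceros
--         - La fila no contiene tres casilleros consecutivos del mismo valor"""
--     if fila > len(secuencia[0]):
--         return False
--     elif not misma_cant_cero_uno(secuencia[fila]) or tres_casilleros_consecutivos(secuencia[fila]):
--         return False
--     else:
--         for i in range(len(secuencia[fila])):
--             #Itera elemento por elemento de la secuencia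
--             if posicion_es_vacia(secuencia, i, fila):
--                 return False
--     return True
-- ===== SOURCE B (Python) =====
-- VACIO = " "
-- NEGRO = "1"
-- BLANCO = "0"
--
-- def secuencia_es_valida(secuencia, fila):
--     if fila > len(secuencia[0]):
--         return False
--     row = secuencia[fila]
--     if VACIO in row:
--         return False
--     # Run-length encode the 0/1 cells (other cells neither join nor break runs,
--     # mirroring the intended semantics), then judge validity from the runs:
--     # every run shorter than 3, and the signed run lengths balance out.
--     runs = []
--     for c in row:
--         if c == BLANCO or c == NEGRO:
--             if runs and runs[-1][0] == c:
--                 runs[-1] = (c, runs[-1][1] + 1)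
--             else:
--                 runs.append((c, 1))
--     balance = 0
--     for ch, n in runs:
--         if n >= 3:
--             return False
--         balance += n if ch == BLANCO else -n
--     return balance == 0
-- ===== Notes on version B (the rewrite author's own statement) =====
-- stated objective: alternative
-- what changed: B run-length encodes the row's 0/1 cells into a list of (char, run length) pairs and decides validity from that structure (no run of length >= 3, signed run lengths sum to zero), instead of A's three staged helper loops with stateful per-cell counters.
import Mathlib
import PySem

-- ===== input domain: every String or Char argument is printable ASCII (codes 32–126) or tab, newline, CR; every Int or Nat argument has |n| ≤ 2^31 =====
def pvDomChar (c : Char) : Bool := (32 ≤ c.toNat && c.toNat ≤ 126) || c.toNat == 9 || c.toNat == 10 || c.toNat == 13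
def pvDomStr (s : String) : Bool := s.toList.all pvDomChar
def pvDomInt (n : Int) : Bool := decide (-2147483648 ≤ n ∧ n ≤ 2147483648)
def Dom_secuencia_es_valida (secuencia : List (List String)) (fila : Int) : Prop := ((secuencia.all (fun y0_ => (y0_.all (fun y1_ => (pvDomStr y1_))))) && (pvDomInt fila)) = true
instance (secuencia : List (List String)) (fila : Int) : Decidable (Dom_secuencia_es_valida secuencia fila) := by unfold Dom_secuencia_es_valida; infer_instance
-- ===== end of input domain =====

-- B judges the row from a run-length encoding of its 0/1 cells (no run ≥ 3, signed run
-- lengths balance) instead of A's three staged counter loops (objective: alternative).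

-- ===== PORT A =====

-- port of misma_cant_cero_uno: the Python loop 'for col in range(len(fila))' reads fila[col]
-- for every in-range col in order, i.e. it visits each element once; folded over the list.
def mismaStep (p : Int × Int) (elem : String) : Int × Int :=
  let p := if elem == "0" then (p.1 + 1, p.2) else p
  if elem == "1" then (p.1, p.2 + 1) else p

def misma_cant_cero_uno (fila : List String) : Bool :=
  let p := fila.foldl mismaStep ((0 : Int), (0 : Int))
  p.1 == p.2

-- port of the loop of tres_casilleros_consecutivos; falling off the loop returns Python's
-- None, which is falsy at the call site, hence `false` here.
def tresAux (n : Nat) : List String → Int → Int → Int → Bool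
  | [], _, _, _ => false
  | elem :: rest, ceros, unos, pasos =>
    let pasos' := pasos + 1
    let s :=
      if elem == "0" then (ceros + 1, (0 : Int))
      else if elem == "1" then ((0 : Int), unos + 1)
      else (ceros, unos)
    if s.1 == 3 || s.2 == 3 then true
    else if (n : Int) < pasos' then false
    else tresAux n rest s.1 s.2 pasos'

def tres_casilleros_consecutivos (fila : List String) : Bool :=
  tresAux fila.length fila 0 0 0

-- port of A's final loop 'for i in range(len(secuencia[fila]))' with posicion_es_vacia:
-- it reads row[i] (always in range) and compares with VACIO.
def emptiesLoop : List String → Bool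
  | [] => true
  | elem :: rest => if elem == " " then false else emptiesLoop rest

def secuencia_es_valida (secuencia : List (List String)) (fila : Int) : Bool :=
  match secuencia with
  | [] => false  -- Python raises IndexError on secuencia[0]; excluded by Pre_
  | r0 :: _ =>
    if (r0.length : Int) < fila then false
    else
      match PySem.List.pyGet? secuencia fila with
      | none => false  -- IndexError; excluded by Pre_
      | some row =>
        if !(misma_cant_cero_uno row) || tres_casilleros_consecutivos row then false
        else emptiesLoop row

-- ===== PORT B =====

-- Python mutates/appends the LAST run of `runs`; ported as the head of a reversed
-- accumulator, reversed at the end — the same runs list, built back-to-front.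
def rleStep (runs : List (String × Nat)) (c : String) : List (String × Nat) :=
  if c == "0" || c == "1" then
    match runs with
    | (ch, n) :: rest => if ch == c then (ch, n + 1) :: rest else (c, 1) :: (ch, n) :: rest
    | [] => [(c, 1)]
  else runs

-- port of Source B's second loop over the runs, with its early return on a long run.
def checkRuns : List (String × Nat) → Int → Bool
  | [], balance => balance == 0
  | (ch, n) :: rest, balance =>
    if 3 ≤ n then false
    else checkRuns rest (balance + (if ch == "0" then (n : Int) else -(n : Int)))

def secuencia_es_valida_alt (secuencia : List (List String)) (fila : Int) : Bool :=
  match secuencia with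
  | [] => false  -- Python raises IndexError on secuencia[0]; excluded by Pre_
  | r0 :: _ =>
    if (r0.length : Int) < fila then false
    else
      match PySem.List.pyGet? secuencia fila with
      | none => false  -- IndexError; excluded by Pre_
      | some row =>
        if row.contains " " then false
        else checkRuns ((row.foldl rleStep []).reverse) 0

-- ===== PRECONDITION & SPEC =====
-- Pre_ excludes exactly the inputs where A raises IndexError: an empty grid
-- (secuencia[0] fails) and an out-of-range row index reached by secuencia[fila].
def Pre_secuencia_es_valida (secuencia : List (List String)) (fila : Int) : Prop :=
  secuencia ≠ [] ∧ ((secuencia.headI.length : Int) < fila ∨ PySem.Raise.InRange secuencia.length fila)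

instance (secuencia : List (List String)) (fila : Int) : Decidable (Pre_secuencia_es_valida secuencia fila) := by
  unfold Pre_secuencia_es_valida; infer_instance

def pvWitness_secuencia_es_valida : List (List String) × Int := ([["0", "1"]], 0)

def Spec_secuencia_es_valida (secuencia : List (List String)) (fila : Int) (out : Bool) : Prop := out = secuencia_es_valida_alt secuencia fila
instance (secuencia : List (List String)) (fila : Int) (out : Bool) : Decidable (Spec_secuencia_es_valida secuencia fila out) := by unfold Spec_secuencia_es_valida; infer_instance

-- ===== CLAIM (what is proved, stated in full; the proofs are below) =====
def Claim_equal_secuencia_es_valida : Prop := ∀ (secuencia : List (List String)) (fila : Int), Dom_secuencia_es_valida secuencia fila → Pre_secuencia_es_valida secuencia fila → Spec_secuencia_es_valida secuencia fila (secuencia_es_valida secuencia fila)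

-- ===== LEMMAS AND PROOFS =====

-- clean structural characterisation of "three consecutive equal cells"
def hasTripleRec : List String → Bool
  | a :: b :: c :: rest => (a == b && b == c) || hasTripleRec (b :: c :: rest)
  | _ => false

def signedSum (rs : List (String × Nat)) : Int :=
  (rs.map (fun r => if r.1 == "0" then (r.2 : Int) else -(r.2 : Int))).sum

lemma hasTripleRec_short (l : List String) (h : l.length < 3) : hasTripleRec l = false := by
  match l with
  | [] => rfl
  | [_] => rfl
  | [_, _] => rfl
  | _ :: _ :: _ :: _ => exact absurd h (by simp)

lemma hasTripleRec_cons_of_ne (a b : String) (l : List String) (h : a ≠ b) :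
    hasTripleRec (a :: b :: l) = hasTripleRec (b :: l) := by
  cases l with
  | nil => rfl
  | cons c rest => simp [hasTripleRec, h]

lemma misma_fold (l : List String) (c u : Int) :
    l.foldl mismaStep (c, u) = (c + (l.count "0" : Int), u + (l.count "1" : Int)) := by
  induction l generalizing c u with
  | nil => simp
  | cons e rest ih =>
    rw [List.foldl_cons]
    by_cases h0 : e = "0"
    · rw [show mismaStep (c, u) e = (c + 1, u) by simp [mismaStep, h0], ih]
      simp [h0, Prod.ext_iff]
      ring
    · by_cases h1 : e = "1"
      · rw [show mismaStep (c, u) e = (c, u + 1) by simp [mismaStep, h1], ih]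
        simp [h1, Prod.ext_iff]
        ring
      · rw [show mismaStep (c, u) e = (c, u) by simp [mismaStep, h0, h1], ih]
        simp [List.count_cons]
        exact ⟨h0, h1⟩

lemma misma_eq_counts (l : List String) :
    misma_cant_cero_uno l = (l.count "0" == l.count "1") := by
  unfold misma_cant_cero_uno
  rw [misma_fold]
  simp

lemma emptiesLoop_eq (l : List String) : emptiesLoop l = !(l.contains " ") := by
  induction l with
  | nil => rfl
  | cons e rest ih =>
    by_cases h : e = " "
    · simp [emptiesLoop, h]
    · simp [emptiesLoop, h, ih]
      exact fun _ he => h he.symm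

lemma dropOne (a b : String) (l : List String) (h : a ≠ b) :
    hasTripleRec (b :: l) = hasTripleRec (a :: b :: l) :=
  (hasTripleRec_cons_of_ne a b l h).symm

lemma dropTwo (a b : String) (l : List String) (h : a ≠ b) :
    hasTripleRec (b :: l) = hasTripleRec (a :: a :: b :: l) := by
  rw [hasTripleRec]
  have hab : (a == b) = false := by simp [h]
  rw [hab, Bool.and_false, Bool.false_or]
  exact dropOne a b l h

lemma tres_inv (rest : List String) (c u : Nat) (pasos : Int) (n : Nat)
    (hc : c ≤ 2) (hu : u ≤ 2) (hcu : c = 0 ∨ u = 0)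
    (hn : pasos + rest.length ≤ n) :
    tresAux n rest (c : Int) (u : Int) pasos
      = hasTripleRec (List.replicate c "0" ++ List.replicate u "1"
          ++ rest.filter (fun e => e == "0" || e == "1")) := by
  induction rest generalizing c u pasos with
  | nil =>
    rw [hasTripleRec_short]
    · rfl
    · simp; omega
  | cons elem rest ih =>
    have hstep : ¬ ((n : Int) < pasos + 1) := by
      simp only [List.length_cons] at hn
      push_cast at hn ⊢
      omega
    have hn' : pasos + 1 + rest.length ≤ n := by
      simp only [List.length_cons] at hn
      push_cast at hn ⊢
      omega
    by_cases h0 : elem = "0"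
    · -- elem == "0": ceros increments, unos resets
      by_cases hc2 : c = 2
      · -- run of three zeros found
        have hu' : u = 0 := by omega
        subst hc2; subst hu'
        simp [tresAux, h0, hasTripleRec]
      · have hne : ¬ ((c : Int) + 1 = 3) := by omega
        rw [show tresAux n (elem :: rest) (c : Int) (u : Int) pasos
              = tresAux n rest ((c : Int) + 1) 0 (pasos + 1) by
            simp [tresAux, h0, hne, hstep]]
        rw [show ((c : Int) + 1) = ((c + 1 : Nat) : Int) by push_cast; ring,
          show ((0 : Int)) = ((0 : Nat) : Int) by rfl,
          ih (c + 1) 0 (pasos + 1) (by omega) (by omega) (Or.inr rfl) hn']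
        rw [show (elem :: rest).filter (fun e => e == "0" || e == "1")
              = "0" :: rest.filter (fun e => e == "0" || e == "1") by simp [h0]]
        rcases hcu with hc0 | hu'
        · -- c = 0: peel the (≤ 2) leading "1"s
          subst hc0
          interval_cases u
          · rfl
          · exact dropOne "1" "0" _ (by decide)
          · exact dropTwo "1" "0" _ (by decide)
        · -- u = 0: absorb the new "0" into the replicate
          subst hu'
          exact congrArg hasTripleRec (by rw [List.replicate_succ' (n := c)]; simp)
    · by_cases h1 : elem = "1"
      · -- elem == "1": unos increments, ceros resets
        by_cases hu2 : u = 2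
        · have hc' : c = 0 := by omega
          subst hu2; subst hc'
          simp [tresAux, h1, hasTripleRec]
        · have hne : ¬ ((u : Int) + 1 = 3) := by omega
          rw [show tresAux n (elem :: rest) (c : Int) (u : Int) pasos
                = tresAux n rest 0 ((u : Int) + 1) (pasos + 1) by
              simp [tresAux, h1, hne, hstep]]
          rw [show ((u : Int) + 1) = ((u + 1 : Nat) : Int) by push_cast; ring,
            show ((0 : Int)) = ((0 : Nat) : Int) by rfl,
            ih 0 (u + 1) (pasos + 1) (by omega) (by omega) (Or.inl rfl) hn']
          rw [show (elem :: rest).filter (fun e => e == "0" || e == "1")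
                = "1" :: rest.filter (fun e => e == "0" || e == "1") by simp [h1]]
          rcases hcu with hc0 | hu'
          · subst hc0
            exact congrArg hasTripleRec (by rw [List.replicate_succ' (n := u)]; simp)
          · subst hu'
            interval_cases c
            · rfl
            · exact dropOne "0" "1" _ (by decide)
            · exact dropTwo "0" "1" _ (by decide)
      · -- other cell: counters unchanged, filtered out
        have hnec : ¬ ((c : Int) = 3) := by omega
        have hneu : ¬ ((u : Int) = 3) := by omega
        rw [show tresAux n (elem :: rest) (c : Int) (u : Int) pasos
              = tresAux n rest (c : Int) (u : Int) (pasos + 1) by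
            simp [tresAux, h0, h1, hnec, hneu, hstep]]
        rw [ih c u (pasos + 1) hc hu hcu hn']
        rw [show (elem :: rest).filter (fun e => e == "0" || e == "1")
              = rest.filter (fun e => e == "0" || e == "1") by simp [h0, h1]]

lemma tres_eq (row : List String) :
    tres_casilleros_consecutivos row
      = hasTripleRec (row.filter (fun e => e == "0" || e == "1")) := by
  unfold tres_casilleros_consecutivos
  have := tres_inv row 0 0 0 row.length (by omega) (by omega) (Or.inl rfl) (by simp)
  simpa using this

-- checkRuns = "all runs short" and "balance + signed sum is zero" (early exit unfolded)
lemma checkRuns_eq (rs : List (String × Nat)) (b : Int) :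
    checkRuns rs b = (rs.all (fun r => r.2 < 3) && (b + signedSum rs == 0)) := by
  induction rs generalizing b with
  | nil => simp [checkRuns, signedSum]
  | cons r rest ih =>
    obtain ⟨ch, n⟩ := r
    by_cases h3 : 3 ≤ n
    · simp [checkRuns, h3, show ¬ (n < 3) by omega]
    · rw [show checkRuns ((ch, n) :: rest) b
            = checkRuns rest (b + (if ch == "0" then (n : Int) else -(n : Int))) by
          simp [checkRuns, h3]]
      rw [ih]
      have hsh : n < 3 := by omega
      simp only [List.all_cons, signedSum, List.map_cons, List.sum_cons, hsh,
        decide_true, Bool.true_and]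
      rw [Int.add_assoc]

-- order does not matter for either condition, so the final reverse is free
lemma checkRuns_reverse (rs : List (String × Nat)) :
    checkRuns rs.reverse 0 = (rs.all (fun r => r.2 < 3) && (signedSum rs == 0)) := by
  rw [checkRuns_eq]
  simp [signedSum, List.sum_reverse]

-- the signed sum of the accumulated runs counts "0"s minus "1"s
lemma rle_signedSum (row : List String) (acc : List (String × Nat)) :
    signedSum (row.foldl rleStep acc)
      = signedSum acc + (row.count "0" : Int) - (row.count "1" : Int) := by
  induction row generalizing acc with
  | nil => simp
  | cons c row ih =>
    rw [List.foldl_cons, ih]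
    have hstep : signedSum (rleStep acc c)
        = signedSum acc + (if c = "0" then 1 else 0) - (if c = "1" then 1 else 0) := by
      by_cases h0 : c = "0"
      · subst h0
        cases acc with
        | nil => simp [rleStep, signedSum]
        | cons r rest =>
          obtain ⟨ch, n⟩ := r
          by_cases hch : ch = "0"
          · subst hch
            simp only [rleStep, signedSum, List.map_cons, List.sum_cons]
            simp
            push_cast
            ring
          · simp only [rleStep, signedSum, List.map_cons, List.sum_cons]
            simp [hch]
            ring
      · by_cases h1 : c = "1"
        · subst h1
          cases acc with
          | nil => simp [rleStep, signedSum, h0]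
          | cons r rest =>
            obtain ⟨ch, n⟩ := r
            by_cases hch : ch = "1"
            · subst hch
              simp only [rleStep, signedSum, List.map_cons, List.sum_cons]
              simp [h0]
              push_cast
              ring
            · simp only [rleStep, signedSum, List.map_cons, List.sum_cons]
              simp [h0, hch]
              ring
        · simp [rleStep, h0, h1]
    rw [hstep]
    by_cases h0 : c = "0"
    · subst h0
      simp [List.count_cons]
      push_cast
      ring
    · by_cases h1 : c = "1"
      · subst h1
        simp [List.count_cons, h0]
        push_cast
        ring
      · simp [List.count_cons, h0, h1]

lemma hasTripleRec_replicate_cons (n : Nat) (ch c : String) (l : List String) (h : ch ≠ c) :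
    hasTripleRec (List.replicate n ch ++ c :: l)
      = (decide (3 ≤ n) || hasTripleRec (c :: l)) := by
  match n with
  | 0 => simp
  | 1 => simp [hasTripleRec_cons_of_ne ch c l h, List.replicate]
  | 2 =>
    have : List.replicate 2 ch ++ c :: l = ch :: ch :: c :: l := by simp [List.replicate]
    rw [this, hasTripleRec]
    simp [h, hasTripleRec_cons_of_ne ch c l h]
  | (m + 3) =>
    have : List.replicate (m + 3) ch ++ c :: l
        = ch :: ch :: ch :: (List.replicate m ch ++ c :: l) := by
      simp [List.replicate_succ]
    rw [this, hasTripleRec]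
    simp

lemma hasTripleRec_replicate (n : Nat) (ch : String) :
    hasTripleRec (List.replicate n ch) = decide (3 ≤ n) := by
  match n with
  | 0 => simp [hasTripleRec]
  | 1 => simp [hasTripleRec, List.replicate]
  | 2 => simp [hasTripleRec, List.replicate]
  | (m + 3) =>
    have : List.replicate (m + 3) ch = ch :: ch :: ch :: List.replicate m ch := by
      simp [List.replicate_succ]
    rw [this, hasTripleRec]
    simp

-- "all runs short" over the fold = no three consecutive equal bits
lemma rle_all_short (row : List String) : ∀ (ch : String) (n : Nat) (rest : List (String × Nat)),
    ((row.foldl rleStep ((ch, n) :: rest)).all (fun r => r.2 < 3))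
      = (rest.all (fun r => r.2 < 3)
          && !hasTripleRec (List.replicate n ch ++ row.filter (fun e => e == "0" || e == "1"))) := by
  induction row with
  | nil =>
    intro ch n rest
    simp only [List.foldl_nil, List.filter_nil, List.append_nil, List.all_cons,
      hasTripleRec_replicate]
    cases h3 : decide (3 ≤ n) <;> simp_all <;> omega
  | cons c row ih =>
    intro ch n rest
    by_cases h0 : c = "0" <;> by_cases h1 : c = "1"
    · simp_all
    · -- c = "0"
      subst h0
      rw [show ("0" :: row).filter (fun e => e == "0" || e == "1")
            = "0" :: row.filter (fun e => e == "0" || e == "1") by simp]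
      by_cases hch : ch = "0"
      · subst hch
        rw [List.foldl_cons,
          show rleStep (("0", n) :: rest) "0" = ("0", n + 1) :: rest by simp [rleStep],
          ih]
        rw [show List.replicate (n + 1) "0" ++ row.filter (fun e => e == "0" || e == "1")
              = List.replicate n "0" ++ "0" :: row.filter (fun e => e == "0" || e == "1") by
            rw [List.replicate_succ' (n := n)]; simp]
      · rw [List.foldl_cons,
          show rleStep ((ch, n) :: rest) "0" = ("0", 1) :: (ch, n) :: rest by
            simp [rleStep, hch],
          ih]
        rw [show List.replicate 1 "0" ++ row.filter (fun e => e == "0" || e == "1")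
              = "0" :: row.filter (fun e => e == "0" || e == "1") by simp [List.replicate]]
        rw [hasTripleRec_replicate_cons n ch "0" _ hch]
        simp only [List.all_cons]
        cases hrest : rest.all (fun r => r.2 < 3) <;>
          cases htr : hasTripleRec ("0" :: row.filter (fun e => e == "0" || e == "1")) <;>
            cases h3 : decide (3 ≤ n) <;> simp_all <;> omega
    · -- c = "1"
      subst h1
      rw [show ("1" :: row).filter (fun e => e == "0" || e == "1")
            = "1" :: row.filter (fun e => e == "0" || e == "1") by simp]
      by_cases hch : ch = "1"
      · subst hch
        rw [List.foldl_cons,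
          show rleStep (("1", n) :: rest) "1" = ("1", n + 1) :: rest by simp [rleStep],
          ih]
        rw [show List.replicate (n + 1) "1" ++ row.filter (fun e => e == "0" || e == "1")
              = List.replicate n "1" ++ "1" :: row.filter (fun e => e == "0" || e == "1") by
            rw [List.replicate_succ' (n := n)]; simp]
      · rw [List.foldl_cons,
          show rleStep ((ch, n) :: rest) "1" = ("1", 1) :: (ch, n) :: rest by
            simp [rleStep, hch],
          ih]
        rw [show List.replicate 1 "1" ++ row.filter (fun e => e == "0" || e == "1")
              = "1" :: row.filter (fun e => e == "0" || e == "1") by simp [List.replicate]]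
        rw [hasTripleRec_replicate_cons n ch "1" _ hch]
        simp only [List.all_cons]
        cases hrest : rest.all (fun r => r.2 < 3) <;>
          cases htr : hasTripleRec ("1" :: row.filter (fun e => e == "0" || e == "1")) <;>
            cases h3 : decide (3 ≤ n) <;> simp_all <;> omega
    · -- c is not a bit: accumulator and filter both unchanged
      rw [List.foldl_cons,
        show rleStep ((ch, n) :: rest) c = (ch, n) :: rest by simp [rleStep, h0, h1],
        ih]
      rw [show (c :: row).filter (fun e => e == "0" || e == "1")
            = row.filter (fun e => e == "0" || e == "1") by simp [h0, h1]]

lemma rle_all_short_nil (row : List String) :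
    ((row.foldl rleStep []).all (fun r => r.2 < 3))
      = !hasTripleRec (row.filter (fun e => e == "0" || e == "1")) := by
  induction row with
  | nil => simp [hasTripleRec]
  | cons c row ih =>
    by_cases h0 : c = "0" <;> by_cases h1 : c = "1"
    · simp_all
    · subst h0
      rw [show ("0" :: row).foldl rleStep [] = row.foldl rleStep [("0", 1)] by
            simp [rleStep]]
      rw [rle_all_short]
      simp [List.replicate]
    · subst h1
      rw [show ("1" :: row).foldl rleStep [] = row.foldl rleStep [("1", 1)] by
            simp [rleStep]]
      rw [rle_all_short]
      simp [List.replicate]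
    · rw [show (c :: row).foldl rleStep [] = row.foldl rleStep [] by simp_all [rleStep]]
      rw [ih]
      rw [show (c :: row).filter (fun e => e == "0" || e == "1")
            = row.filter (fun e => e == "0" || e == "1") by simp_all]

-- the two validity cores agree on any row
lemma core_row (row : List String) :
    (if !(misma_cant_cero_uno row) || tres_casilleros_consecutivos row then false
     else emptiesLoop row)
    = (if row.contains " " then false
       else checkRuns ((row.foldl rleStep []).reverse) 0) := by
  rw [checkRuns_reverse, rle_all_short_nil, rle_signedSum]
  rw [misma_eq_counts, emptiesLoop_eq, tres_eq]
  simp only [signedSum, List.map_nil, List.sum_nil]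
  have hbal : ((0 + (row.count "0" : Int) - (row.count "1" : Int) == 0))
      = (row.count "0" == row.count "1") := by
    cases h : (row.count "0" == row.count "1") <;> simp_all <;> omega
  rw [hbal]
  by_cases hsp : row.contains " " = true <;>
    cases hm : (row.count "0" == row.count "1") <;>
      cases ht : hasTripleRec (row.filter fun e => e == "0" || e == "1") <;>
        simp_all

-- ===== VERDICT (by name: the statement is the Claim_ definition above) =====
theorem secuencia_es_valida_spec : Claim_equal_secuencia_es_valida := by
  intro secuencia fila _dom _pre
  unfold Spec_secuencia_es_valida
  cases secuencia with
  | nil => rfl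
  | cons r0 srest =>
    unfold secuencia_es_valida secuencia_es_valida_alt
    by_cases hlt : (r0.length : Int) < fila
    · simp [hlt]
    · simp only [hlt, if_false]
      cases hget : PySem.List.pyGet? (r0 :: srest) fila with
      | none => rfl
      | some row => exact core_row row
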